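-- pv_equiv track=rewrite | github.com/BYU-PCCL/chitchat-dataset | chitchat_dataset/__init__.py | compound_conversation
-- ===== SOURCE A (Python) =====
-- import itertools
-- from typing import Iterable, Iterator, Tuple
--
-- def compound_conversation(
--     convo: Iterable[str],
--     first_speaker_token: str,
--     second_speaker_token: str,
--     prefix: str = "",
-- ) -> Iterator[Tuple[str, str]]:
--     """Compounds a single conversation.
--
--     Returns an iterator over compounding input/target example tuples of the
--     form (assuming a 4 turn conversation)::
--
--         ("<s1>message1", "<s2>message2")
--         ("<s1>message1<s2>message2", "<s1>message3")
--         ("<s1>message1<s2>message2<s1>message3", "<s2>message4")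
--
--     Where: ``<s1>`` denotes the ``first_speaker_token`` and
--     ``<s2>`` denotes the ``second_speaker_token``.
--     """
--     first_tok = first_speaker_token
--     second_tok = second_speaker_token
--
--     convo = list(convo)
--     for i in range(1, len(convo)):
--         c = "".join(prepend_cycle(convo[:i], [first_tok, second_tok]))
--         yield prefix + c, first_tok + convo[i] if i % 2 == 0 else second_tok + convo[i]
--
-- def prepend_cycle(texts: Iterable[str], cycle: Iterable[str]) -> Iterator[str]:
--     """Prepends an element of ``cycle`` in order to each element of ``texts``."""
--     for token, text in zip(itertools.cycle(cycle), texts):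
--         yield token + text
-- ===== SOURCE B (Python) =====
-- from itertools import accumulate
--
--
-- def compound_conversation(convo, first_speaker_token, second_speaker_token, prefix=""):
--     """Tag every turn with its speaker token once up front, then make a single
--     forward pass pairing each running prefix with the next tagged turn."""
--     tagged = [
--         (first_speaker_token if j % 2 == 0 else second_speaker_token) + turn
--         for j, turn in enumerate(convo)
--     ]
--     return ((prefix + acc, nxt) for acc, nxt in zip(accumulate(tagged), tagged[1:]))
-- ===== Notes on version B (the rewrite author's own statement) =====
-- stated objective: alternative
-- what changed: B tags each turn with its speaker token once in a single upfront pass, then zips itertools.accumulate's running concatenations with the next tagged turn, instead of A's per-iteration re-slice, re-zip-with-cycle and re-join of the whole prefix (measured ~3x at n=256, but both remain quadratic in total output size).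
import Mathlib
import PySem

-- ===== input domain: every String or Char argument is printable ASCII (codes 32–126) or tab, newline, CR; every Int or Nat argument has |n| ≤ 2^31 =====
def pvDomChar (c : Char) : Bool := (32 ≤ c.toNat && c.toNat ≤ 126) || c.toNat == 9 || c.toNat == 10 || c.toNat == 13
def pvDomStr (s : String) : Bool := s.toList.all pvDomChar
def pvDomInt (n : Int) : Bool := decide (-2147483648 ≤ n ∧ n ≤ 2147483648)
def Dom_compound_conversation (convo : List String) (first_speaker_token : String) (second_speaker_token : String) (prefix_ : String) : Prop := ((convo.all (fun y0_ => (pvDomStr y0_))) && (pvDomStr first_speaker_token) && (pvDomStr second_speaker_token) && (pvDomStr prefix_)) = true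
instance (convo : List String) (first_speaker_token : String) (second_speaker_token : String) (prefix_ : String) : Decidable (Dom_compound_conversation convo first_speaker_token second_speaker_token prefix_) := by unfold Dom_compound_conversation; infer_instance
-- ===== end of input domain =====

-- B tags every turn with its speaker token once up front and pairs the running accumulated
-- prefixes with the next tagged turn in one pass, instead of A's per-iteration
-- re-slice/re-zip-with-cycle/re-join; both Pythons are lazy generators, and the sequences
-- they produce are what the two list-valued ports compare.

-- ===== PORT A =====
-- zip(itertools.cycle(cycle), texts): the cycle list is rotated one step per consumed element
def prependCycle : List String → List String → List String
  | [], _ => []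
  | _ :: _, [] => []
  | t :: ts, tok :: rest => (tok ++ t) :: prependCycle ts (rest ++ [tok])

def compound_conversation (convo : List String) (first_speaker_token : String) (second_speaker_token : String) (prefix_ : String) : List (String × String) :=
  (PySem.List.pyRange 1 (convo.length : Int)).foldl
    (fun acc i =>
      let c := PySem.Str.join "" (prependCycle (PySem.List.slice convo none (some i)) [first_speaker_token, second_speaker_token])
      -- convo[i]: i ∈ range(1, len(convo)) is always in range, so the "" default is unreachable
      acc ++ [(prefix_ ++ c,
        (if PySem.Int.mod i 2 == 0 then first_speaker_token else second_speaker_token) ++ PySem.List.pyGetD convo i "")])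
    []

-- ===== PORT B =====
-- itertools.accumulate on strings: the running concatenations of the list
def accumulateStr : String → List String → List String
  | _, [] => []
  | a, x :: xs => (a ++ x) :: accumulateStr (a ++ x) xs

def compound_conversation_alt (convo : List String) (first_speaker_token : String) (second_speaker_token : String) (prefix_ : String) : List (String × String) :=
  let tagged := (PySem.List.enumerate convo).map
    (fun jt => (if PySem.Int.mod jt.1 2 == 0 then first_speaker_token else second_speaker_token) ++ jt.2)
  ((accumulateStr "" tagged).zip (PySem.List.slice tagged (some 1) none)).map
    (fun an => (prefix_ ++ an.1, an.2))

-- ===== PRECONDITION & SPEC =====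
def Spec_compound_conversation (convo : List String) (first_speaker_token : String) (second_speaker_token : String) (prefix_ : String) (out : List (String × String)) : Prop := out = compound_conversation_alt convo first_speaker_token second_speaker_token prefix_
instance (convo : List String) (first_speaker_token : String) (second_speaker_token : String) (prefix_ : String) (out : List (String × String)) : Decidable (Spec_compound_conversation convo first_speaker_token second_speaker_token prefix_ out) := by unfold Spec_compound_conversation; infer_instance

-- ===== CLAIM (what is proved, stated in full; the proofs are below) =====
def Claim_equal_compound_conversation : Prop := ∀ (convo : List String) (first_speaker_token : String) (second_speaker_token : String) (prefix_ : String), Dom_compound_conversation convo first_speaker_token second_speaker_token prefix_ → Spec_compound_conversation convo first_speaker_token second_speaker_token prefix_ (compound_conversation convo first_speaker_token second_speaker_token prefix_)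

-- ===== LEMMAS AND PROOFS =====

theorem join_empty_cons (x : String) (l : List String) :
    PySem.Str.join "" (x :: l) = x ++ PySem.Str.join "" l := by
  cases l with
  | nil => simp [PySem.Str.join, PySem.Chars.join, List.intercalate]
  | cons y t => simp [PySem.Str.join, PySem.Chars.join, List.intercalate, String.ofList_append]

theorem prependCycle_take (xs : List String) (n : Nat) (cyc : List String) :
    prependCycle (xs.take n) cyc = (prependCycle xs cyc).take n := by
  induction xs generalizing n cyc with
  | nil => simp [prependCycle]
  | cons t ts ih =>
    cases n with
    | zero => cases cyc <;> simp [prependCycle]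
    | succ m =>
      cases cyc with
      | nil => simp [prependCycle]
      | cons tok rest => simp [prependCycle, ih]

theorem prependCycle_getElem? (xs : List String) (f s : String) (k : Nat) :
    (prependCycle xs [f, s])[k]? = xs[k]?.map (fun t => (if k % 2 = 0 then f else s) ++ t) := by
  induction xs generalizing f s k with
  | nil => simp [prependCycle]
  | cons t ts ih =>
    cases k with
    | zero => simp [prependCycle]
    | succ m =>
      have h := ih s f m
      rcases Nat.mod_two_eq_zero_or_one m with hm | hm <;>
        simp [prependCycle, h, Nat.add_mod, hm]

theorem length_prependCycle (xs : List String) (f s : String) :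
    (prependCycle xs [f, s]).length = xs.length := by
  induction xs generalizing f s with
  | nil => simp [prependCycle]
  | cons t ts ih => simp [prependCycle, ih]

theorem accumulateStr_getElem? (T : List String) (a : String) (k : Nat) :
    (accumulateStr a T)[k]? = T[k]?.map (fun _ => a ++ PySem.Str.join "" (T.take (k + 1))) := by
  induction T generalizing a k with
  | nil => simp [accumulateStr]
  | cons t ts ih =>
    cases k with
    | zero =>
      simp [accumulateStr, PySem.Str.join, PySem.Chars.join, List.intercalate]
    | succ m =>
      simp [accumulateStr, ih, join_empty_cons, String.append_assoc]

theorem tagged_eq (convo : List String) (f s : String) (n : Nat) :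
    (PySem.List.enumerate convo (n : Int)).map
      (fun jt => (if PySem.Int.mod jt.1 2 == 0 then f else s) ++ jt.2)
      = prependCycle convo (if n % 2 = 0 then [f, s] else [s, f]) := by
  induction convo generalizing f s n with
  | nil => rcases Nat.mod_two_eq_zero_or_one n with h | h <;>
      simp [PySem.List.enumerate_nil, prependCycle]
  | cons t ts ih =>
    have h1 : ((n : Int) + 1) = ((n + 1 : Nat) : Int) := by push_cast; ring
    have hbeq : (PySem.Int.mod (n : Int) 2 == 0) = (n % 2 == 0) := by
      rw [show ((2:Int)) = ((2:Nat):Int) from rfl, PySem.Int.mod_natCast]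
      cases h : n % 2 == 0 <;> simp_all
    rw [PySem.List.enumerate_cons, List.map_cons, h1, ih f s (n+1)]
    rcases Nat.mod_two_eq_zero_or_one n with hm | hm
    · have hm2 : (n + 1) % 2 = 1 := by omega
      simp only [hbeq, hm, hm2]
      norm_num
      rfl
    · have hm2 : (n + 1) % 2 = 0 := by omega
      simp only [hbeq, hm, hm2]
      norm_num
      rfl

def masterCC (T : List String) (p : String) : List (String × String) :=
  (List.range (T.length - 1)).map
    (fun k => (p ++ PySem.Str.join "" (T.take (k + 1)), T.getD (k + 1) ""))

theorem modbeq (m : Nat) : (PySem.Int.mod (m : Int) 2 == 0) = (m % 2 == 0) := by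
  rw [show ((2:Int)) = ((2:Nat):Int) from rfl, PySem.Int.mod_natCast]
  cases h : m % 2 == 0 <;> simp_all

theorem A_eq_master (convo : List String) (f s p : String) :
    compound_conversation convo f s p = masterCC (prependCycle convo [f, s]) p := by
  unfold compound_conversation
  rw [PySem.List.foldl_congr_mem _ _
    (fun acc (i : Int) => acc ++ [((p ++ PySem.Str.join "" ((prependCycle convo [f, s]).take i.toNat),
      (prependCycle convo [f, s]).getD i.toNat ""))]) []
    (by
      intro acc i hi
      rw [PySem.List.mem_pyRange_one] at hi
      obtain ⟨h1, h2⟩ := hi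
      obtain ⟨m, rfl⟩ : ∃ m : Nat, i = ((m : Nat) : Int) := ⟨i.toNat, by omega⟩
      have hlt : m < convo.length := by exact_mod_cast h2
      have hT := prependCycle_getElem? convo f s m
      have hc : convo[m]? = some convo[m] := List.getElem?_eq_getElem hlt
      simp only [PySem.List.slice_to _ (by positivity : (0:Int) ≤ ((m : Nat) : Int)),
        PySem.List.pyGetD_natCast, modbeq, Int.toNat_natCast, prependCycle_take]
      congr 2
      simp [List.getD, hT, hc])]
  rw [PySem.List.foldl_append_singleton_eq_map, PySem.List.pyRange_one, List.map_map]
  unfold masterCC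
  rw [length_prependCycle]
  have hlen : ((convo.length : Int) - 1).toNat = convo.length - 1 := by omega
  rw [hlen]
  apply List.map_congr_left
  intro k hk
  rw [List.mem_range] at hk
  have : ((1 : Int) + (k : Int)).toNat = k + 1 := by omega
  simp [this]

theorem B_eq_master (convo : List String) (f s p : String) :
    compound_conversation_alt convo f s p = masterCC (prependCycle convo [f, s]) p := by
  unfold compound_conversation_alt
  have ht : (PySem.List.enumerate convo).map
      (fun jt => (if PySem.Int.mod jt.1 2 == 0 then f else s) ++ jt.2)
      = prependCycle convo [f, s] := by simpa using tagged_eq convo f s 0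
  simp only [ht, PySem.List.slice_from_one]
  apply List.ext_getElem?
  intro k
  simp only [List.getElem?_map, masterCC, List.zip_eq_zipWith, List.getElem?_zipWith,
    accumulateStr_getElem?, List.getElem?_tail]
  rcases lt_or_ge k ((prependCycle convo [f, s]).length - 1) with hk | hk
  · have h1 : k < (prependCycle convo [f, s]).length := by omega
    have h2 : k + 1 < (prependCycle convo [f, s]).length := by omega
    rw [List.getElem?_eq_getElem h1, List.getElem?_eq_getElem h2, List.getElem?_range hk]
    simp [List.getD, List.getElem?_eq_getElem h2]
  · have hr : (List.range ((prependCycle convo [f, s]).length - 1))[k]? = none :=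
      List.getElem?_eq_none (by simpa using hk)
    rw [hr]
    rcases lt_or_ge k (prependCycle convo [f, s]).length with hges | hges
    · rw [List.getElem?_eq_getElem hges,
        List.getElem?_eq_none (by omega : (prependCycle convo [f, s]).length ≤ k + 1)]
      simp
    · rw [List.getElem?_eq_none hges, List.getElem?_eq_none (by omega)]
      simp

-- ===== VERDICT (by name: the statement is the Claim_ definition above) =====
theorem compound_conversation_spec : Claim_equal_compound_conversation := by
  intro convo f s p _
  unfold Spec_compound_conversation
  rw [A_eq_master, B_eq_master]
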